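-- pv_equiv track=rewrite | github.com/leehyeonmin34/algorithm | src/programmers/level4/Programmers_[3차]_자동완성.py | solution
-- ===== SOURCE A (Python) =====
-- def solution(words):
--
--     # 각 노드가 딕셔너리로서 표현되며,
--     # 해당 노드의 일반 자식은 char key를 갖고,
--     # 속성값은 DUP, END 같은 별도의 key를 갖는다.
--     DUP, END = "DUP", "END"
--
--     # 트라이 그래프 생성
--     root = {}
--     for word in words:
--         curr = root
--         for char in word:
--             curr = curr.setdefault(char, {})
--             curr[DUP] = 1 if DUP not in curr else curr[DUP] + 1
--
--         curr[END] = True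
--
--     # dfs로 가지쳐지는 부분이나 단어가 끝나는 부분 탐색
--     sum = 0
--     s = [[root, 0]]
--     while s:
--         curr, m = s.pop()
--
--         # 중복이 1인 곳(더 이상 탐색 필요 X)
--         if DUP in curr and curr[DUP] == 1:
--             sum += m
--             continue
--
--         # 단어가 끝나는 부분
--         sum += m if END in curr else 0
--
--         # 자식 노드들 추가
--         for key, next in curr.items():
--             if key not in [DUP, END]:
--                 s.append([next, m + 1])
--
--     return sum
-- ===== SOURCE B (Python) =====
-- def solution(words):
--     # Count, for every non-empty prefix p, how many words (with multiplicity) start with p.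
--     pref = {}
--     for w in words:
--         for d in range(1, len(w) + 1):
--             p = w[:d]
--             pref[p] = pref.get(p, 0) + 1
--     # A distinct word is typed up to its first prefix shared by no other word occurrence.
--     total = 0
--     for w in set(words):
--         presses = len(w)
--         for d in range(1, len(w) + 1):
--             if pref.get(w[:d], 0) == 1:
--                 presses = d
--                 break
--         total += presses
--     return total
-- ===== Notes on version B (the rewrite author's own statement) =====
-- stated objective: alternative
-- what changed: Replaces the linked trie plus explicit-stack DFS with a flat dictionary counting every non-empty prefix once, then for each distinct word a single scan for its first prefix whose count is 1 (capped at the word's length).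
import Mathlib
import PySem

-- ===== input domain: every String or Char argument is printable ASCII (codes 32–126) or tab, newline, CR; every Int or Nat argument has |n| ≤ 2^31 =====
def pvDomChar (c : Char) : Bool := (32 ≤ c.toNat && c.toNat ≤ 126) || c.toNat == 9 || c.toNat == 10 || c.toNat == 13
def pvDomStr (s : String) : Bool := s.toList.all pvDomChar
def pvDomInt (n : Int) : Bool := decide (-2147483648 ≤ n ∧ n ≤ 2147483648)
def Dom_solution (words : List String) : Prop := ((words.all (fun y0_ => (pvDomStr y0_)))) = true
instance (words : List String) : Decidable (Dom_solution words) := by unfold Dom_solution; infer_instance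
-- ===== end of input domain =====

-- B replaces A's linked trie + explicit-stack DFS by a flat prefix-count dictionary and a
-- per-distinct-word scan for the first uniquely-owned prefix (alternative algorithm, same cost).


-- ===== PORT A =====
-- The Python trie node is a dict whose Char keys are the children (insertion order kept as an
-- assoc list) and whose special keys DUP/END are the two extra fields (Option Int / Bool).
mutual
inductive PyTrie where
  | node : Option Int → Bool → PyKids → PyTrie
  deriving DecidableEq, Repr
inductive PyKids where
  | nil : PyKids
  | cons : Char → PyTrie → PyKids → PyKids
  deriving DecidableEq, Repr
end

-- curr.setdefault(char, {}): look the child up (first match) …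
def getKid : PyKids → Char → Option PyTrie
  | .nil, _ => none
  | .cons k t rest, c => if k = c then some t else getKid rest c

-- … and store the updated child back (overwrite keeps the position, a new key appends).
def setKid : PyKids → Char → PyTrie → PyKids
  | .nil, c, v => .cons c v .nil
  | .cons k t rest, c, v => if k = c then .cons k v rest else .cons k t (setKid rest c v)

-- curr[DUP] = 1 if DUP not in curr else curr[DUP] + 1
def bumpDup : PyTrie → PyTrie
  | .node d e ks => .node (some (match d with | none => 1 | some k => k + 1)) e ks

-- the inner 'for char in word' loop, then curr[END] = True on the final node
def insertChars : PyTrie → List Char → PyTrie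
  | .node d _ ks, [] => .node d true ks
  | .node d e ks, c :: cs =>
      let child := (getKid ks c).getD (.node none false .nil)
      .node d e (setKid ks c (insertChars (bumpDup child) cs))

def kidsList : PyKids → List (Char × PyTrie)
  | .nil => []
  | .cons k t rest => (k, t) :: kidsList rest

mutual
def sizeT : PyTrie → Nat
  | .node _ _ ks => 1 + sizeK ks
def sizeK : PyKids → Nat
  | .nil => 0
  | .cons _ t rest => sizeT t + sizeK rest
end

def stackSize (s : List (PyTrie × Int)) : Nat := (s.map (fun p => sizeT p.1)).sum

theorem stackSize_push (ks : PyKids) (m : Int) (rest : List (PyTrie × Int)) :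
    stackSize ((kidsList ks).reverse.map (fun p => (p.2, m + 1)) ++ rest) =
      sizeK ks + stackSize rest := by
  match ks with
  | .nil => simp [kidsList, stackSize, sizeK]
  | .cons k t r =>
      have ih := stackSize_push r m rest
      simp only [kidsList, sizeK, List.reverse_cons, List.map_append, List.map_cons,
        List.map_nil, stackSize, List.sum_append, List.append_assoc, List.cons_append,
        List.nil_append, List.sum_cons] at *
      omega

-- the 'while s:' loop; s.pop() pops the most recently appended child, so the stack is a
-- head list and a node's children are pushed in reverse order.
def dfs : List (PyTrie × Int) → Int
  | [] => 0
  | (t, m) :: rest =>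
      match t with
      | .node d e ks =>
          if d = some 1 then m + dfs rest
          else (if e then m else 0) +
            dfs ((kidsList ks).reverse.map (fun p => (p.2, m + 1)) ++ rest)
termination_by s => stackSize s
decreasing_by
  · simp [stackSize, sizeT]
  · rw [stackSize_push]; simp [stackSize, sizeT]

def solution (words : List String) : Int :=
  let root := words.foldl (fun t w => insertChars t w.toList) (.node none false .nil)
  dfs [(root, 0)]

-- ===== PORT B =====
-- pref[p] = pref.get(p, 0) + 1 over every non-empty prefix p of every word
def buildPref (words : List String) : PySem.Dict String Int :=
  words.foldl (fun d w =>
    (PySem.List.pyRange 1 (PySem.Str.len w + 1) 1).foldl (fun d2 i =>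
      let p := PySem.Str.slice w none (some i)
      d2.insert p (d2.getD p 0 + 1)) d) PySem.Dict.empty

-- the inner 'for d in range(1, len(w)+1): … break' loop
def pressLoop (pref : PySem.Dict String Int) (w : String) (presses : Int) : List Int → Int
  | [] => presses
  | i :: is =>
      if pref.getD (PySem.Str.slice w none (some i)) 0 = 1 then i
      else pressLoop pref w presses is

def solution_alt (words : List String) : Int :=
  let pref := buildPref words
  (PySem.Set.ofList words).foldl (fun total w =>
    total + pressLoop pref w (PySem.Str.len w)
      (PySem.List.pyRange 1 (PySem.Str.len w + 1) 1)) 0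

-- ===== PRECONDITION & SPEC =====
def Spec_solution (words : List String) (out : Int) : Prop := out = solution_alt words
instance (words : List String) (out : Int) : Decidable (Spec_solution words out) := by unfold Spec_solution; infer_instance

-- ===== CLAIM (what is proved, stated in full; the proofs are below) =====
def Claim_equal_solution : Prop := ∀ (words : List String), Dom_solution words → Spec_solution words (solution words)

-- ===== LEMMAS AND PROOFS =====

-- ---- the common specification layer ----

-- number of occurrences (with multiplicity) of words having p as a prefix
def cnt (L : List (List Char)) (p : List Char) : Nat := L.countP (fun w => decide (p <+: w))

-- tails of the words starting with c, in order, with multiplicity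
def tailsOf (c : Char) (L : List (List Char)) : List (List Char) :=
  L.filterMap (fun w => match w with
    | [] => none
    | c' :: cs => if c' = c then some cs else none)

-- key presses needed for w among L: depth of the first prefix owned by a single occurrence,
-- capped at w's length
def f1 (L : List (List Char)) : List Char → Nat
  | [] => 0
  | c :: cs => if cnt L [c] = 1 then 1 else 1 + f1 (tailsOf c L) cs

-- first-occurrence dedup (order-preserving)
def fdL {α : Type} [DecidableEq α] : List α → List α
  | [] => []
  | x :: xs => x :: fdL (xs.filter (fun y => y ≠ x))
termination_by l => l.length
decreasing_by
  simp only [List.length_cons, List.length_unattach]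
  exact Nat.lt_succ_of_le (le_trans (List.length_filter_le _ _) (by simp))

def heads (L : List (List Char)) : List Char := L.filterMap (fun w => w.head?)

def firstHeads (L : List (List Char)) : List Char := fdL (heads L)

def sumLen (L : List (List Char)) : Nat := (L.map (fun w => w.length + 1)).sum

theorem sumLen_tails_le (c : Char) (L : List (List Char)) :
    sumLen (tailsOf c L) + (tailsOf c L).length ≤ sumLen L := by
  induction L with
  | nil => simp [tailsOf, sumLen]
  | cons w L ih =>
      match w with
      | [] => simp only [tailsOf, List.filterMap_cons] at *; simp [sumLen] at *; omega
      | c' :: cs =>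
          simp only [tailsOf, List.filterMap_cons] at *
          by_cases h : c' = c <;>
            simp [h, sumLen, List.sum_cons] at * <;> omega

theorem sumLen_tails_lt (c : Char) (L : List (List Char)) (h : tailsOf c L ≠ []) :
    sumLen (tailsOf c L) < sumLen L := by
  have := sumLen_tails_le c L
  have : 1 ≤ (tailsOf c L).length := by
    cases htl : tailsOf c L with
    | nil => exact absurd htl h
    | cons a b => simp
  omega

-- the canonical trie that A's insertion loop builds
mutual
def canon (d : Option Int) (L : List (List Char)) : PyTrie :=
  .node d (decide ([] ∈ L)) (canonKids L (firstHeads L))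
termination_by (sumLen L, 1, 0)
def canonKids (L : List (List Char)) : List Char → PyKids
  | [] => .nil
  | c :: cs =>
      .cons c
        (if _h : tailsOf c L = [] then .node (some (cnt L [c] : Int)) false .nil
         else canon (some (cnt L [c] : Int)) (tailsOf c L))
        (canonKids L cs)
termination_by cs => (sumLen L, 0, cs.length)
decreasing_by
  · exact Prod.Lex.left _ _ (sumLen_tails_lt _ _ _h)
  · exact Prod.Lex.right _ (Prod.Lex.right _ (by simp))
end

-- the value A's DFS accumulates from a node reached after m presses
mutual
def g : PyTrie → Int → Int
  | .node d e ks, m => if d = some 1 then m else (if e then m else 0) + gK ks m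
def gK : PyKids → Int → Int
  | .nil, _ => 0
  | .cons _ t rest, m => g t (m + 1) + gK rest m
end

def G (L : List (List Char)) (m : Int) : Int :=
  ((fdL L).map (fun w => m + (f1 L w : Int))).sum

-- ---- A side: the DFS sums g over the stack ----

theorem gK_sum (ks : PyKids) (m : Int) :
    gK ks m = ((kidsList ks).map (fun p => g p.2 (m + 1))).sum := by
  match ks with
  | .nil => simp [gK, kidsList]
  | .cons k t r => simp [gK, kidsList, gK_sum r m]

theorem dfs_sum (s : List (PyTrie × Int)) :
    dfs s = (s.map (fun p => g p.1 p.2)).sum := by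
  match s with
  | [] => simp [dfs]
  | (t, m) :: rest =>
      match t with
      | .node d e ks =>
          rw [dfs]
          by_cases hd : d = some 1
          · have := dfs_sum rest
            simp [hd, g, this]
          · rw [dfs_sum ((kidsList ks).reverse.map (fun p => (p.2, m + 1)) ++ rest)]
            simp only [g, hd, if_false, gK_sum, List.map_append, List.sum_append,
              List.map_reverse, List.sum_reverse, List.map_map, List.map_cons, List.sum_cons]
            have hc : ((kidsList ks).map ((fun p => g p.1 p.2) ∘ (fun p => (p.2, m + 1)))).sum
                = ((kidsList ks).map (fun p => g p.2 (m + 1))).sum := by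
              congr 1
            rw [hc]
            ring
termination_by stackSize s
decreasing_by
  · simp [stackSize, sizeT]
  · rw [stackSize_push]; simp [stackSize, sizeT]

-- ---- the trie A builds is the canonical trie ----

def entryOf (L : List (List Char)) (c : Char) : PyTrie :=
  if tailsOf c L = [] then .node (some (cnt L [c] : Int)) false .nil
  else canon (some (cnt L [c] : Int)) (tailsOf c L)

theorem canonKids_nil (L : List (List Char)) : canonKids L [] = .nil := by
  rw [canonKids]

theorem canonKids_cons (L : List (List Char)) (c : Char) (cs : List Char) :
    canonKids L (c :: cs) = .cons c (entryOf L c) (canonKids L cs) := by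
  rw [canonKids, entryOf]
  split <;> rfl

theorem getKid_canonKids (L : List (List Char)) (cs : List Char) (c : Char) :
    getKid (canonKids L cs) c = if c ∈ cs then some (entryOf L c) else none := by
  induction cs with
  | nil => simp [canonKids, getKid]
  | cons k cs ih =>
      rw [canonKids_cons, getKid]
      by_cases hk : k = c
      · subst hk; simp
      · simp [hk, ih, Ne.symm hk]

theorem canonKids_congr (L L' : List (List Char)) (cs : List Char)
    (h : ∀ c ∈ cs, entryOf L c = entryOf L' c) :
    canonKids L cs = canonKids L' cs := by
  induction cs with
  | nil => rw [canonKids, canonKids]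
  | cons k cs ih =>
      rw [canonKids_cons, canonKids_cons, h k (by simp), ih (fun c hc => h c (by simp [hc]))]

theorem setKid_canonKids (L L' : List (List Char)) (cs : List Char) (c : Char) (v : PyTrie)
    (hc : c ∈ cs) (hnd : cs.Nodup) (hv : v = entryOf L' c)
    (hcong : ∀ c' ∈ cs, c' ≠ c → entryOf L c' = entryOf L' c') :
    setKid (canonKids L cs) c v = canonKids L' cs := by
  induction cs with
  | nil => simp at hc
  | cons k cs ih =>
      rw [canonKids_cons, setKid, canonKids_cons]
      by_cases hk : k = c
      · subst hk
        have hnotin : k ∉ cs := (List.nodup_cons.mp hnd).1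
        have hcc : canonKids L cs = canonKids L' cs :=
          canonKids_congr L L' cs (fun c' h' =>
            hcong c' (by simp [h']) (fun he => hnotin (he ▸ h')))
        simp [hv, hcc]
      · simp only [hk, if_false]
        have h1 : entryOf L k = entryOf L' k := hcong k (by simp) hk
        rw [h1, ih (by simpa [hk, Ne.symm hk] using hc) (by exact hnd.of_cons)
          (fun c' h h' => hcong c' (by simp [h]) h')]

def appKids : PyKids → PyKids → PyKids
  | .nil, b => b
  | .cons k t r, b => .cons k t (appKids r b)

theorem setKid_none (ks : PyKids) (c : Char) (v : PyTrie) (h : getKid ks c = none) :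
    setKid ks c v = appKids ks (.cons c v .nil) := by
  match ks with
  | .nil => rfl
  | .cons k t r =>
      rw [getKid] at h
      by_cases hk : k = c
      · simp [hk] at h
      · simp only [hk, if_false] at h
        simp [setKid, hk, appKids, setKid_none r c v h]

theorem canonKids_append (L : List (List Char)) (as bs : List Char) :
    canonKids L (as ++ bs) = appKids (canonKids L as) (canonKids L bs) := by
  induction as with
  | nil => rw [canonKids]; rfl
  | cons k as ih => rw [List.cons_append, canonKids_cons, canonKids_cons, appKids, ih]

-- ---- counting / tails / first-occurrence facts ----

theorem cnt_len (L : List (List Char)) (c : Char) : cnt L [c] = (tailsOf c L).length := by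
  induction L with
  | nil => rfl
  | cons w L ih =>
      match w with
      | [] => simpa [cnt, tailsOf, List.countP_cons] using ih
      | c' :: cs =>
          by_cases h : c' = c
          · subst h
            simp only [cnt, List.countP_cons, tailsOf, List.filterMap_cons] at *
            simp [List.cons_prefix_iff, ih]
          · simp only [cnt, List.countP_cons, tailsOf, List.filterMap_cons, if_neg h] at *
            simp [List.cons_prefix_iff, h, ih]

theorem cnt_cons (L : List (List Char)) (c : Char) (p : List Char) :
    cnt (tailsOf c L) p = cnt L (c :: p) := by
  induction L with
  | nil => rfl
  | cons w L ih =>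
      match w with
      | [] => simpa [cnt, tailsOf, List.countP_cons] using ih
      | c' :: cs =>
          by_cases h : c' = c
          · subst h
            simp only [cnt, tailsOf, List.filterMap_cons, List.countP_cons] at *
            simp [List.countP_cons, List.cons_prefix_iff, ih]
          · simp only [cnt, tailsOf, List.filterMap_cons, if_neg h, List.countP_cons] at *
            simp [List.cons_prefix_iff, h, ih]

theorem tailsOf_append_nil (c : Char) (L : List (List Char)) :
    tailsOf c (L ++ [[]]) = tailsOf c L := by
  simp [tailsOf, List.filterMap_append]

theorem tailsOf_append_cons (c : Char) (L : List (List Char)) (c' : Char) (cs : List Char) :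
    tailsOf c (L ++ [c' :: cs]) = tailsOf c L ++ (if c' = c then [cs] else []) := by
  by_cases h : c' = c <;> simp [tailsOf, List.filterMap_append, h]

theorem heads_append_nil (L : List (List Char)) : heads (L ++ [[]]) = heads L := by
  simp [heads, List.filterMap_append]

theorem heads_append_cons (L : List (List Char)) (c : Char) (cs : List Char) :
    heads (L ++ [c :: cs]) = heads L ++ [c] := by
  simp [heads, List.filterMap_append]

theorem mem_fdL {α : Type} [DecidableEq α] (l : List α) (x : α) : x ∈ fdL l ↔ x ∈ l := by
  match l with
  | [] => simp [fdL]
  | y :: ys =>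
      rw [fdL]
      have ih := mem_fdL (ys.filter (fun z => z ≠ y)) x
      simp only [ne_eq, decide_not] at ih ⊢
      by_cases hx : x = y
      · simp [hx]
      · simp [hx, ih, List.mem_filter]
termination_by l.length
decreasing_by simpa using Nat.lt_succ_of_le (List.length_filter_le _ _)

theorem nodup_fdL {α : Type} [DecidableEq α] (l : List α) : (fdL l).Nodup := by
  match l with
  | [] => simp [fdL]
  | y :: ys =>
      rw [fdL]
      have ih := nodup_fdL (ys.filter (fun z => z ≠ y))
      simp only [ne_eq, decide_not] at ih ⊢
      refine List.nodup_cons.mpr ⟨fun hy => ?_, ih⟩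
      have := (mem_fdL _ _).mp hy
      simp [List.mem_filter] at this
termination_by l.length
decreasing_by simpa using Nat.lt_succ_of_le (List.length_filter_le _ _)

theorem fdL_append {α : Type} [DecidableEq α] (l : List α) (c : α) :
    fdL (l ++ [c]) = if c ∈ l then fdL l else fdL l ++ [c] := by
  match l with
  | [] => simp [fdL]
  | y :: ys =>
      rw [List.cons_append, fdL, fdL]
      have ih := fdL_append (ys.filter (fun z => z ≠ y)) c
      simp only [ne_eq, decide_not] at ih ⊢
      by_cases hc : c = y
      · simp [hc, List.filter_append]
      · have hfa : (ys ++ [c]).filter (fun z => !decide (z = y))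
            = ys.filter (fun z => !decide (z = y)) ++ [c] := by
          simp [List.filter_append, hc]
        rw [hfa, ih]
        by_cases hm : c ∈ ys <;> simp [hm, hc, List.mem_filter]
termination_by l.length
decreasing_by simpa using Nat.lt_succ_of_le (List.length_filter_le _ _)

theorem mem_heads (c : Char) (L : List (List Char)) : c ∈ heads L ↔ tailsOf c L ≠ [] := by
  induction L with
  | nil => simp [heads, tailsOf]
  | cons w L ih =>
      match w with
      | [] => simpa [heads, tailsOf, List.filterMap_cons] using ih
      | c' :: cs =>
          have ht : tailsOf c ((c' :: cs) :: L) = if c' = c then cs :: tailsOf c L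
              else tailsOf c L := by
            by_cases h : c' = c <;> simp [tailsOf, h]
          by_cases h : c' = c
          · rw [ht, if_pos h]; simp [heads, h]
          · rw [ht, if_neg h]
            have h' : ¬(c = c') := fun e => h e.symm
            simp only [heads, List.mem_filterMap] at ih
            simp [heads, h', List.mem_filterMap, ih]

theorem entryOf_congr (L L' : List (List Char)) (c : Char)
    (h : tailsOf c L = tailsOf c L') : entryOf L c = entryOf L' c := by
  rw [entryOf, entryOf, cnt_len, cnt_len, h]

theorem canon_nil (d : Option Int) : canon d [] = .node d false .nil := by
  rw [canon, canonKids.eq_def]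
  simp [firstHeads, heads, fdL]

theorem bump_canon (n : Int) (L : List (List Char)) :
    bumpDup (canon (some n) L) = canon (some (n + 1)) L := by
  rw [canon, canon]; rfl

theorem insert_canon (w : List Char) : ∀ (d : Option Int) (L : List (List Char)),
    insertChars (canon d L) w = canon d (L ++ [w]) := by
  induction w with
  | nil =>
      intro d L
      rw [canon, canon]
      simp only [insertChars]
      have h1 : firstHeads (L ++ [[]]) = firstHeads L := by
        simp only [firstHeads, heads_append_nil]
      rw [h1]
      have h2 : canonKids L (firstHeads L) = canonKids (L ++ [[]]) (firstHeads L) :=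
        canonKids_congr _ _ _ (fun c _ => entryOf_congr _ _ _ (tailsOf_append_nil c L).symm)
      rw [h2]
      simp
  | cons c cs ih =>
      intro d L
      rw [canon, canon]
      simp only [insertChars]
      have hend : ([] ∈ L ++ [c :: cs]) = ([] ∈ L) := by simp
      by_cases hc : c ∈ firstHeads L
      · -- existing child
        have htl : tailsOf c L ≠ [] := (mem_heads c L).mp ((mem_fdL _ _).mp hc)
        have hfh : firstHeads (L ++ [c :: cs]) = firstHeads L := by
          rw [firstHeads, heads_append_cons, fdL_append,
            if_pos ((mem_heads c L).mpr htl)]; rfl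
        have hget : getKid (canonKids L (firstHeads L)) c = some (entryOf L c) := by
          rw [getKid_canonKids, if_pos hc]
        have hentry : entryOf L c = canon (some (cnt L [c] : Int)) (tailsOf c L) := by
          rw [entryOf, if_neg htl]
        have htl' : tailsOf c (L ++ [c :: cs]) = tailsOf c L ++ [cs] := by
          rw [tailsOf_append_cons, if_pos rfl]
        have hstep : insertChars (bumpDup (entryOf L c)) cs
            = canon (some ((cnt L [c] : Int) + 1)) (tailsOf c L ++ [cs]) := by
          rw [hentry, bump_canon, ih]
        have hcnt : (cnt (L ++ [c :: cs]) [c] : Int) = (cnt L [c] : Int) + 1 := by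
          rw [cnt_len, cnt_len, htl']
          push_cast [List.length_append]
          simp
        have hv : canon (some ((cnt L [c] : Int) + 1)) (tailsOf c L ++ [cs])
            = entryOf (L ++ [c :: cs]) c := by
          rw [entryOf, if_neg (by simp [htl']), hcnt, htl']
        rw [hfh, hget]
        simp only [Option.getD_some]
        rw [hstep, hv,
          setKid_canonKids L (L ++ [c :: cs]) (firstHeads L) c _ hc (nodup_fdL _) rfl
            (fun c' _ hne => entryOf_congr _ _ _ (by
              rw [tailsOf_append_cons, if_neg (fun he : c = c' => hne he.symm), List.append_nil]))]
        simp [hend]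
      · -- new child
        have htl : tailsOf c L = [] := by
          by_contra h
          exact hc ((mem_fdL _ _).mpr ((mem_heads c L).mpr h))
        have hget : getKid (canonKids L (firstHeads L)) c = none := by
          rw [getKid_canonKids, if_neg hc]
        have hfh : firstHeads (L ++ [c :: cs]) = firstHeads L ++ [c] := by
          rw [firstHeads, heads_append_cons, fdL_append,
            if_neg (fun hm => hc ((mem_fdL _ _).mpr hm))]; rfl
        have hbump : bumpDup (PyTrie.node none false .nil) = canon (some 1) [] := by
          rw [canon_nil]; rfl
        have hstep : insertChars (bumpDup (PyTrie.node none false .nil)) cs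
            = canon (some 1) [cs] := by
          rw [hbump, ih]; rfl
        have htl' : tailsOf c (L ++ [c :: cs]) = [cs] := by
          rw [tailsOf_append_cons, if_pos rfl, htl]; rfl
        have hentry' : entryOf (L ++ [c :: cs]) c = canon (some 1) [cs] := by
          rw [entryOf, if_neg (by simp [htl']), cnt_len, htl']
          rfl
        rw [hfh, hget]
        simp only [Option.getD_none]
        rw [hstep, setKid_none _ _ _ hget, canonKids_append]
        have h1 : canonKids L (firstHeads L) = canonKids (L ++ [c :: cs]) (firstHeads L) :=
          canonKids_congr _ _ _ (fun c' hc' => entryOf_congr _ _ _ (by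
            rw [tailsOf_append_cons,
              if_neg (fun he : c = c' => hc (he.symm ▸ hc')), List.append_nil]))
        have h2 : canonKids (L ++ [c :: cs]) [c] = .cons c (canon (some 1) [cs]) .nil := by
          rw [canonKids_cons, hentry', canonKids_nil]
        rw [h1, h2]
        simp [hend]

theorem build_canon (ws : List String) : ∀ L : List (List Char),
    ws.foldl (fun t w => insertChars t w.toList) (canon none L)
      = canon none (L ++ ws.map String.toList) := by
  induction ws with
  | nil => intro L; simp
  | cons w ws ih =>
      intro L
      simp only [List.foldl_cons, insert_canon, ih, List.map_cons]
      simp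

-- ---- partitioning the dedup'd word list by first character ----

theorem tailsOf_filter (c : Char) (L : List (List Char)) (p : List Char → Bool)
    (q : List Char → Bool) (h : ∀ cs, p (c :: cs) = q cs) :
    tailsOf c (L.filter p) = (tailsOf c L).filter q := by
  induction L with
  | nil => rfl
  | cons w L ih =>
      match w with
      | [] =>
          by_cases hp : p [] <;> simp [tailsOf, hp] at * <;>
            exact ih
      | c' :: x =>
          by_cases hc : c' = c
          · subst hc
            by_cases hp : p (c' :: x)
            · have hq : q x = true := by rw [← h]; exact hp
              simp [tailsOf, hp, hq] at *
              exact ih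
            · have hq : q x = false := by rw [← h]; simpa using hp
              simp [tailsOf, hp, hq] at *
              exact ih
          · by_cases hp : p (c' :: x) <;>
              simp [tailsOf, hp, hc] at * <;>
              exact ih

theorem tailsOf_fdL (c : Char) (L : List (List Char)) :
    tailsOf c (fdL L) = fdL (tailsOf c L) := by
  match L with
  | [] => simp [fdL, tailsOf]
  | w :: L =>
      rw [fdL]
      match w with
      | [] =>
          have h1 : tailsOf c ([] :: fdL (L.filter (fun y => y ≠ []))) =
              tailsOf c (fdL (L.filter (fun y => y ≠ []))) := by
            simp [tailsOf]
          rw [h1, tailsOf_fdL c (L.filter (fun y => y ≠ []))]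
          have h2 : tailsOf c (L.filter (fun y => y ≠ [])) = tailsOf c L := by
            have := tailsOf_filter c L (fun y => y ≠ []) (fun _ => true) (by simp)
            simpa using this
          rw [h2]
          simp [tailsOf]
      | c' :: x =>
          by_cases hc : c' = c
          · subst c'
            have h1 : tailsOf c ((c :: x) :: fdL (L.filter (fun y => y ≠ c :: x))) =
                x :: tailsOf c (fdL (L.filter (fun y => y ≠ c :: x))) := by
              simp [tailsOf]
            rw [h1, tailsOf_fdL c (L.filter (fun y => y ≠ c :: x))]
            have h2 : tailsOf c (L.filter (fun y => y ≠ c :: x)) =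
                (tailsOf c L).filter (fun y => y ≠ x) := by
              exact tailsOf_filter c L _ _ (by intro cs; simp)
            rw [h2]
            have h3 : tailsOf c ((c :: x) :: L) = x :: tailsOf c L := by
              simp [tailsOf]
            rw [h3, fdL]
          · have h1 : tailsOf c ((c' :: x) :: fdL (L.filter (fun y => y ≠ c' :: x))) =
                tailsOf c (fdL (L.filter (fun y => y ≠ c' :: x))) := by
              simp [tailsOf, hc]
            rw [h1, tailsOf_fdL c (L.filter (fun y => y ≠ c' :: x))]
            have h2 : tailsOf c (L.filter (fun y => y ≠ c' :: x)) = tailsOf c L := by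
              have hpq : ∀ cs : List Char,
                  (fun (y : List Char) => decide (y ≠ c' :: x)) (c :: cs) = true := by
                intro cs
                have hne : (c :: cs) ≠ (c' :: x) := by
                  intro h
                  injection h with h1 _
                  exact hc h1.symm
                simp [hne]
              have := tailsOf_filter c L (fun y => y ≠ c' :: x) (fun _ => true) hpq
              simpa using this
            rw [h2]
            have h3 : tailsOf c ((c' :: x) :: L) = tailsOf c L := by
              simp [tailsOf, hc]
            rw [h3]
termination_by L.length
decreasing_by
  all_goals simpa using Nat.lt_succ_of_le (List.length_filter_le _ _)

theorem sum_head_split (H : List Char → Int) (c : Char) (X : List (List Char)) :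
    ((X.map H).sum : Int) = ((X.filter (fun w => w.head? ≠ some c)).map H).sum
      + ((tailsOf c X).map (fun w' => H (c :: w'))).sum := by
  induction X with
  | nil => simp [tailsOf]
  | cons w X ih =>
      match w with
      | [] =>
          have hT : tailsOf c ([] :: X) = tailsOf c X := by
            simp [tailsOf]
          have hfil : (([] : List Char) :: X).filter (fun w => w.head? ≠ some c)
              = [] :: X.filter (fun w => w.head? ≠ some c) := by
            simp
          rw [List.map_cons, List.sum_cons, ih, hT, hfil, List.map_cons, List.sum_cons]
          ring
      | c' :: x =>
          by_cases hc : c' = c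
          · subst c'
            have hT : tailsOf c ((c :: x) :: X) = x :: tailsOf c X := by
              simp [tailsOf]
            have hfil : ((c :: x) :: X).filter (fun w => w.head? ≠ some c)
                = X.filter (fun w => w.head? ≠ some c) := by
              simp
            rw [List.map_cons, List.sum_cons, ih, hT, hfil, List.map_cons, List.sum_cons]
            ring
          · have hT : tailsOf c ((c' :: x) :: X) = tailsOf c X := by
              simp [tailsOf, hc]
            have hfil : ((c' :: x) :: X).filter (fun w => w.head? ≠ some c)
                = (c' :: x) :: X.filter (fun w => w.head? ≠ some c) := by
              simp [hc]
            rw [List.map_cons, List.sum_cons, ih, hT, hfil, List.map_cons, List.sum_cons]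
            ring

theorem sum_partition (H : List Char → Int) (X : List (List Char)) (cs : List Char)
    (hnd : cs.Nodup) (hX : ∀ w ∈ X, ∀ c w', w = c :: w' → c ∈ cs) :
    ((X.map H).sum : Int) = ((X.filter (fun w => w.isEmpty)).map H).sum
      + (cs.map (fun c => ((tailsOf c X).map (fun w' => H (c :: w'))).sum)).sum := by
  match cs with
  | [] =>
      have : X.filter (fun w => w.isEmpty) = X := by
        apply List.filter_eq_self.mpr
        intro w hw
        match w with
        | [] => rfl
        | c :: x => exact absurd (hX _ hw c x rfl) (by simp)
      simp [this]
  | c :: cs =>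
      rw [sum_head_split H c X]
      have hsub : ∀ w ∈ X.filter (fun w => w.head? ≠ some c), ∀ c' w', w = c' :: w' → c' ∈ cs := by
        intro w hw c' w' hww
        have hmem := List.mem_of_mem_filter hw
        have := hX w hmem c' w' hww
        rcases List.mem_cons.mp this with h | h
        · exfalso
          have := List.of_mem_filter hw
          rw [hww, h] at this
          simp at this
        · exact h
      have ih := sum_partition H (X.filter (fun w => w.head? ≠ some c)) cs
        (List.nodup_cons.mp hnd).2 hsub
      rw [ih]
      have he : (X.filter (fun w => w.head? ≠ some c)).filter (fun w => w.isEmpty)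
          = X.filter (fun w => w.isEmpty) := by
        rw [List.filter_filter]
        apply List.filter_congr
        intro w _
        match w with
        | [] => simp
        | c' :: x => simp
      have ht : ∀ c' ∈ cs, tailsOf c' (X.filter (fun w => w.head? ≠ some c)) = tailsOf c' X := by
        intro c' hc'
        have hcc : c' ≠ c := fun h => (List.nodup_cons.mp hnd).1 (h ▸ hc')
        have := tailsOf_filter c' X (fun w => w.head? ≠ some c) (fun _ => true)
          (by intro cs'; simp [hcc])
        simpa using this
      rw [he]
      have hmap : (cs.map (fun c' => ((tailsOf c' (X.filter (fun w => w.head? ≠ some c))).map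
          (fun w' => H (c' :: w'))).sum)).sum
          = (cs.map (fun c' => ((tailsOf c' X).map (fun w' => H (c' :: w'))).sum)).sum := by
        apply congrArg
        apply List.map_congr_left
        intro c' hc'
        rw [ht c' hc']
      rw [hmap]
      simp [List.map_cons, List.sum_cons]
      ring

theorem filter_empty_nodup (X : List (List Char)) (hnd : X.Nodup) (H : List Char → Int) :
    ((X.filter (fun w => w.isEmpty)).map H).sum = if [] ∈ X then H [] else 0 := by
  induction X with
  | nil => simp
  | cons w X ih =>
      have hnd' := (List.nodup_cons.mp hnd).2
      match w with
      | [] =>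
          have hne : [] ∉ X := by
            have := (List.nodup_cons.mp hnd).1
            simpa using this
          simp [ih hnd', hne]
      | c :: x =>
          simp [ih hnd']

theorem G_split (L : List (List Char)) (m : Int) :
    (if [] ∈ L then m else 0)
      + ((firstHeads L).map
          (fun c => if cnt L [c] = 1 then m + 1 else G (tailsOf c L) (m + 1))).sum
    = G L m := by
  rw [G, sum_partition (fun w => m + (f1 L w : Int)) (fdL L) (firstHeads L) (nodup_fdL _)
    (by
      intro w hw c w' hww
      have hmem := (mem_fdL _ _).mp hw
      apply (mem_fdL _ _).mpr
      rw [heads]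
      exact List.mem_filterMap.mpr ⟨w, hmem, by rw [hww]; rfl⟩)]
  rw [filter_empty_nodup _ (nodup_fdL _)]
  have h1 : (if [] ∈ fdL L then m + (f1 L [] : Int) else 0) = if [] ∈ L then m else 0 := by
    rw [f1]
    simp [mem_fdL]
  rw [h1]
  congr 1
  apply congrArg
  apply List.map_congr_left
  intro c hc
  have htl : tailsOf c L ≠ [] := (mem_heads c L).mp ((mem_fdL _ _).mp hc)
  rw [tailsOf_fdL]
  by_cases h1 : cnt L [c] = 1
  · have hlen : (tailsOf c L).length = 1 := by rw [← cnt_len, h1]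
    obtain ⟨w0, hw0⟩ := List.length_eq_one_iff.mp hlen
    rw [h1]
    simp only [reduceIte]
    rw [hw0]
    have : fdL [w0] = [w0] := by simp [fdL]
    rw [this]
    simp [f1]
    rw [show cnt L [c] = 1 from h1]
    simp
  · rw [if_neg h1, G]
    apply congrArg
    apply List.map_congr_left
    intro w' _
    rw [f1]
    rw [if_neg h1]
    push_cast
    ring

-- ---- the DFS value of the canonical trie is the spec sum ----

theorem g_canon (L : List (List Char)) (d : Option Int) (m : Int) :
    g (canon d L) m = if d = some 1 then m else G L m := by
  rw [canon]
  by_cases hd : d = some 1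
  · simp [g, hd]
  · simp only [g, hd, if_false]
    rw [← G_split L m]
    have hmem : (if decide ([] ∈ L) = true then m else 0) = if [] ∈ L then m else 0 := by
      simp
    rw [hmem]
    congr 1
    have hfh : ∀ c ∈ firstHeads L, tailsOf c L ≠ [] :=
      fun c hc => (mem_heads c L).mp ((mem_fdL _ _).mp hc)
    generalize firstHeads L = cs at hfh ⊢
    induction cs with
    | nil => simp [canonKids_nil, gK]
    | cons c cs ihc =>
        rw [canonKids_cons]
        simp only [gK, List.map_cons, List.sum_cons]
        have htl : tailsOf c L ≠ [] := hfh c (by simp)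
        have hent : entryOf L c = canon (some (cnt L [c] : Int)) (tailsOf c L) := by
          rw [entryOf, if_neg htl]
        have hrec := g_canon (tailsOf c L) (some (cnt L [c] : Int)) (m + 1)
        rw [hent, hrec, ihc (fun c' hc' => hfh c' (by simp [hc']))]
        by_cases h1 : cnt L [c] = 1
        · simp [h1]
        · have : ¬ ((cnt L [c] : Int) = 1) := by exact_mod_cast h1
          simp [h1, this]
termination_by sumLen L
decreasing_by exact sumLen_tails_lt _ _ htl

-- ---- B side: the prefix dictionary is a counter of all non-empty prefixes ----

def prefs (w : String) : List String :=
  (PySem.List.pyRange 1 (PySem.Str.len w + 1) 1).map (fun i => PySem.Str.slice w none (some i))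

theorem buildPref_eq (words : List String) :
    buildPref words = PySem.Dict.counter (words.flatMap prefs) := by
  rw [← PySem.Dict.foldl_insert_getD_add_one_eq_counter, List.foldl_flatMap, buildPref]
  congr 1
  funext d w
  rw [prefs, List.foldl_map]

theorem pyRange_cast (m : Nat) : ∀ k : Nat,
    PySem.List.pyRange (k : Int) ((k + m : Nat) : Int) 1
      = List.map (fun d : Nat => (d : Int)) (List.range' k m) := by
  induction m with
  | zero =>
      intro k
      rw [PySem.List.pyRange_of_pos (k : Int) ((k + 0 : Nat) : Int) (by omega : (0:Int) < 1)]
      simp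
  | succ m ih =>
      intro k
      rw [PySem.List.pyRange_one_cons (by push_cast; omega)]
      have h1 : ((k : Int) + 1) = ((k + 1 : Nat) : Int) := by push_cast; ring
      have h2 : ((k + (m + 1) : Nat) : Int) = (((k + 1) + m : Nat) : Int) := by push_cast; ring
      rw [h1, h2, ih (k + 1), List.range'_succ]
      simp

theorem pyRange_cast1 (m : Nat) :
    PySem.List.pyRange 1 ((m : Int) + 1) 1 = List.map (fun d : Nat => (d : Int)) (List.range' 1 m) := by
  have h := pyRange_cast m 1
  have h1 : ((1 + m : Nat) : Int) = (m : Int) + 1 := by push_cast; ring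
  have h2 : ((1 : Nat) : Int) = (1 : Int) := Nat.cast_one
  rw [h1, h2] at h
  exact h

theorem countP_unique {l : List Nat} (hl : l.Nodup) (k : Nat) (pred : Nat → Bool)
    (h : ∀ d ∈ l, pred d = true ↔ d = k) :
    l.countP pred = if k ∈ l then 1 else 0 := by
  induction l with
  | nil => simp
  | cons a l ih =>
      obtain ⟨ha, hl'⟩ := List.nodup_cons.mp hl
      rw [List.countP_cons]
      by_cases hak : a = k
      · subst hak
        have : pred a = true := (h a (by simp)).mpr rfl
        rw [ih hl' (fun d hd => h d (by simp [hd]))]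
        simp [this, ha]
      · have : ¬ pred a = true := fun hp => hak ((h a (by simp)).mp hp)
        rw [ih hl' (fun d hd => h d (by simp [hd]))]
        by_cases hk : k ∈ l <;> simp [hk, this, Ne.symm hak]

theorem slice_toList (w : String) (d : Nat) :
    (PySem.Str.slice w none (some (d : Int))).toList = w.toList.take d := by
  rw [PySem.Str.toList_slice, PySem.Chars.slice_eq_listSlice, PySem.List.slice_to_natCast]

theorem count_prefs (w p : String) :
    (prefs w).count p
      = if p.toList ≠ [] ∧ p.toList <+: w.toList then 1 else 0 := by
  have hm : prefs w = (List.range' 1 w.toList.length).map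
      (fun d : Nat => PySem.Str.slice w none (some (d : Int))) := by
    rw [prefs, PySem.Str.len_eq, pyRange_cast1]
    simp only [List.map_map]
    rfl
  rw [hm, List.count_eq_countP, List.countP_map]
  by_cases hc : p.toList ≠ [] ∧ p.toList <+: w.toList
  · rw [if_pos hc]
    have key : ∀ d ∈ List.range' 1 w.toList.length,
        ((fun x => x == p) ∘ (fun d : Nat => PySem.Str.slice w none (some (d : Int)))) d = true
          ↔ d = p.toList.length := by
      intro d hd
      obtain ⟨hd1, hd2⟩ := List.mem_range'_1.mp hd
      simp only [Function.comp_apply, beq_iff_eq]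
      constructor
      · intro he
        have h0 := congrArg String.toList he
        rw [slice_toList] at h0
        have hlen := congrArg List.length h0
        rw [List.length_take] at hlen
        omega
      · intro he
        subst he
        apply String.toList_inj.mp
        rw [slice_toList]
        exact (List.prefix_iff_eq_take.mp hc.2).symm
    rw [countP_unique (List.nodup_range' 1) p.toList.length _ key]
    have hle : p.toList.length ≤ w.toList.length := hc.2.length_le
    have hge : 1 ≤ p.toList.length := by
      cases hp : p.toList with
      | nil => exact absurd hp hc.1
      | cons a l => simp
    rw [if_pos (List.mem_range'_1.mpr ⟨hge, by omega⟩)]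
  · rw [if_neg hc]
    apply List.countP_eq_zero.mpr
    intro d hd hp
    obtain ⟨hd1, hd2⟩ := List.mem_range'_1.mp hd
    simp only [Function.comp_apply, beq_iff_eq] at hp
    have h0 := congrArg String.toList hp
    rw [slice_toList] at h0
    apply hc
    constructor
    · intro hpe
      rw [hpe] at h0
      have : w.toList = [] := by
        cases hw : w.toList with
        | nil => rfl
        | cons a l =>
            rw [hw] at h0
            rcases d with _ | d
            · omega
            · simp at h0
      rw [this] at hd2
      simp at hd2
      omega
    · rw [← h0]
      exact List.take_prefix d w.toList

theorem count_flat (words : List String) (p : String) (hp : p.toList ≠ []) :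
    (words.flatMap prefs).count p = cnt (words.map String.toList) p.toList := by
  induction words with
  | nil => simp [cnt]
  | cons w ws ih =>
      rw [List.flatMap_cons, List.count_append, count_prefs, List.map_cons]
      rw [cnt, List.countP_cons, ← cnt, ih]
      by_cases hpre : p.toList <+: w.toList
      · simp [hpre, hp]
        omega
      · simp [hpre, hp]

theorem pref_getD (words : List String) (p : String) (hp : p.toList ≠ []) :
    (buildPref words).getD p 0 = (cnt (words.map String.toList) p.toList : Int) := by
  rw [buildPref_eq, PySem.Dict.getD_counter, count_flat words p hp]

def firstHit (L : List (List Char)) (u : List Char) : List Nat → Nat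
  | [] => u.length
  | d :: ds => if cnt L (u.take d) = 1 then d else firstHit L u ds

theorem pressLoop_eq (words : List String) (w : String) (ds : List Nat)
    (hds : ∀ d ∈ ds, 1 ≤ d ∧ d ≤ w.toList.length) :
    pressLoop (buildPref words) w ((w.toList.length : Int)) (ds.map (fun d : Nat => (d : Int)))
      = (firstHit (words.map String.toList) w.toList ds : Int) := by
  induction ds with
  | nil => rw [List.map_nil, pressLoop, firstHit]
  | cons d ds ih =>
      obtain ⟨hd1, hd2⟩ := hds d (by simp)
      have hu : w.toList ≠ [] := by
        intro h
        rw [h] at hd2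
        simp at hd2
        omega
      have htake : (PySem.Str.slice w none (some (d : Int))).toList = w.toList.take d :=
        slice_toList w d
      have htne : w.toList.take d ≠ [] := by
        intro h
        rcases List.take_eq_nil_iff.mp h with h' | h'
        · omega
        · exact hu h'
      have hg : (buildPref words).getD (PySem.Str.slice w none (some (d : Int))) 0
          = (cnt (words.map String.toList) (w.toList.take d) : Int) := by
        rw [pref_getD words _ (by rw [htake]; exact htne), htake]
      rw [List.map_cons, pressLoop, hg, firstHit]
      by_cases hcnt : cnt (words.map String.toList) (w.toList.take d) = 1
      · rw [if_pos (by exact_mod_cast hcnt), if_pos hcnt]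
      · rw [if_neg (by exact_mod_cast hcnt), if_neg hcnt,
          ih (fun d' hd' => hds d' (by simp [hd']))]

theorem firstHit_shift (L : List (List Char)) (c : Char) (u' : List Char) :
    ∀ (m k : Nat), firstHit L (c :: u') (List.range' (k + 1) m)
      = 1 + firstHit (tailsOf c L) u' (List.range' k m) := by
  intro m
  induction m with
  | zero =>
      intro k
      rw [List.range', List.range', firstHit, firstHit]
      simp only [List.length_cons]
      omega
  | succ m ih =>
      intro k
      rw [List.range'_succ, List.range'_succ, firstHit, firstHit]
      have ht : (c :: u').take (k + 1) = c :: u'.take k := List.take_succ_cons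
      rw [ht, ← cnt_cons]
      by_cases h : cnt (tailsOf c L) (u'.take k) = 1
      · rw [if_pos h, if_pos h]
        omega
      · rw [if_neg h, if_neg h]
        have := ih (k + 1)
        rw [show k + 1 + 1 = (k + 1) + 1 from rfl] at this
        exact this

theorem firstHit_f1 (u : List Char) : ∀ L, firstHit L u (List.range' 1 u.length) = f1 L u := by
  induction u with
  | nil => intro L; rw [List.length_nil, List.range', firstHit, f1]; rfl
  | cons c u' ih =>
      intro L
      rw [List.length_cons, List.range'_succ, firstHit, f1]
      have ht : (c :: u').take 1 = [c] := rfl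
      rw [ht]
      by_cases h : cnt L [c] = 1
      · rw [if_pos h, if_pos h]
      · rw [if_neg h, if_neg h, show (1:Nat) + 1 = 1 + 1 from rfl, firstHit_shift, ih]

theorem press_f1 (words : List String) (w : String) :
    pressLoop (buildPref words) w (PySem.Str.len w)
        (PySem.List.pyRange 1 (PySem.Str.len w + 1) 1)
      = ((f1 (words.map String.toList) w.toList : Nat) : Int) := by
  rw [PySem.Str.len_eq, pyRange_cast1, pressLoop_eq words w _
    (fun d hd => List.mem_range'_1.mp hd |> fun ⟨h1, h2⟩ => ⟨h1, by omega⟩), firstHit_f1]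

theorem foldl_add_acc {α : Type} [DecidableEq α] [BEq α] [LawfulBEq α] :
    ∀ (l : List α) (s : List α),
      List.foldl PySem.Set.add s l = s ++ fdL (l.filter (fun x => decide (¬ x ∈ s))) := by
  intro l
  induction l with
  | nil => intro s; simp [fdL]
  | cons x xs ih =>
      intro s
      rw [List.foldl_cons]
      have hadd : PySem.Set.add s x = if s.contains x then s else s ++ [x] := rfl
      by_cases hx : x ∈ s
      · have hcon : s.contains x = true := List.contains_iff_mem.mpr hx
        rw [hadd, hcon, if_pos rfl, ih s]
        have : (x :: xs).filter (fun x => decide (¬ x ∈ s)) = xs.filter (fun x => decide (¬ x ∈ s)) := by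
          simp [hx]
        rw [this]
      · have hcon : s.contains x = false := by
          rw [← Bool.not_eq_true]
          intro h
          exact hx (List.contains_iff_mem.mp h)
        rw [hadd, hcon, if_neg (by simp), ih (s ++ [x])]
        have hfil : (x :: xs).filter (fun y => decide (¬ y ∈ s)) = x :: xs.filter (fun y => decide (¬ y ∈ s)) := by
          simp [hx]
        have hff : (xs.filter (fun y => decide (¬ y ∈ s))).filter (fun y => y ≠ x)
            = xs.filter (fun y => decide (¬ y ∈ s ++ [x])) := by
          rw [List.filter_filter]
          apply List.filter_congr
          intro y _
          by_cases hy : y ∈ s <;> by_cases hyx : y = x <;> simp [hy, hyx]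
        rw [hfil, fdL, hff, List.append_assoc]
        rfl

theorem fdL_eq_ofList {α : Type} [DecidableEq α] [BEq α] [LawfulBEq α] (l : List α) :
    PySem.Set.ofList l = fdL l := by
  rw [PySem.Set.ofList_eq_foldl, foldl_add_acc l []]
  have : l.filter (fun x => decide (¬ x ∈ ([] : List α))) = l :=
    List.filter_eq_self.mpr (by simp)
  rw [this, List.nil_append]

theorem fdL_map_inj {α β : Type} [DecidableEq α] [DecidableEq β] (f : α → β)
    (hf : Function.Injective f) : ∀ l : List α, fdL (l.map f) = (fdL l).map f := by
  intro l
  match l with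
  | [] => simp [fdL]
  | x :: xs =>
      rw [List.map_cons, fdL, fdL]
      have hfil : (xs.map f).filter (fun y => y ≠ f x) = (xs.filter (fun y => y ≠ x)).map f := by
        rw [List.filter_map]
        congr 1
        apply List.filter_congr
        intro y _
        simp only [Function.comp_apply, ne_eq, decide_not]
        by_cases hyx : y = x
        · simp [hyx]
        · have hne : ¬ f y = f x := fun h => hyx (hf h)
          simp [hyx, hne]
      rw [hfil, fdL_map_inj f hf (xs.filter (fun y => y ≠ x)), List.map_cons]
termination_by l => l.length
decreasing_by simpa using Nat.lt_succ_of_le (List.length_filter_le _ _)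

theorem main_eq (words : List String) : solution words = solution_alt words := by
  rw [solution, solution_alt]
  have hroot : words.foldl (fun t w => insertChars t w.toList) (.node none false .nil)
      = canon none (words.map String.toList) := by
    rw [← canon_nil none, build_canon words []]
    rfl
  rw [hroot, dfs_sum, List.map_cons, List.map_nil, List.sum_cons, List.sum_nil,
    g_canon]
  rw [if_neg (by simp)]
  rw [PySem.List.foldl_add, fdL_eq_ofList]
  have hmap : (fdL words).map (fun w => pressLoop (buildPref words) w (PySem.Str.len w)
      (PySem.List.pyRange 1 (PySem.Str.len w + 1) 1))
      = (fdL words).map (fun w => ((f1 (words.map String.toList) w.toList : Nat) : Int)) := by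
    apply List.map_congr_left
    intro w _
    rw [press_f1]
  rw [hmap, G]
  rw [fdL_map_inj String.toList (fun a b h => String.toList_inj.mp h) words, List.map_map]
  simp [Function.comp_def]

-- ===== VERDICT (by name: the statement is the Claim_ definition above) =====
theorem solution_spec : Claim_equal_solution := by
  intro words _
  exact main_eq words
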